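-- pv_equiv track=rewrite | github.com/sarahdaher/C-compiler | MegaC/compiler/statement.py | get_element_address
-- ===== SOURCE A (Python) =====
-- def get_element_address(tup, size, pointer, tab_size, dim_list):
--     dim_nb = len(dim_list)
--     pos = pointer - tab_size
--     tup = list(tup)
--
--     for i in range(dim_nb - 1):
--         subtab_size = size
--
--         for j in range(i + 1, dim_nb):
--             subtab_size *= dim_list[j]
--
--         pos += tup[i] * subtab_size
--
--     pos += size * tup[dim_nb - 1]
--     return pos
-- ===== SOURCE B (Python) =====
-- def get_element_address(tup, size, pointer, tab_size, dim_list):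
--     pos = pointer - tab_size
--     mult = size
--     for i in range(len(dim_list) - 1, -1, -1):
--         pos += tup[i] * mult
--         mult *= dim_list[i]
--     return pos
-- ===== Notes on version B (the rewrite author's own statement) =====
-- stated objective: faster
-- what changed: Single backward pass maintaining a running stride product (pos,mult) instead of recomputing the suffix product of dim_list with an inner loop for every index.
-- intended difference: When dim_list is empty (and tup is not), A returns pointer - tab_size + size*tup[-1] via negative-index wraparound, while B returns pointer - tab_size; with no dimensions there is no element offset, so B's value is the intended one. — e.g. on get_element_address([5], 2, 10, 0, []): A returns 20, B returns 10
import Mathlib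
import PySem

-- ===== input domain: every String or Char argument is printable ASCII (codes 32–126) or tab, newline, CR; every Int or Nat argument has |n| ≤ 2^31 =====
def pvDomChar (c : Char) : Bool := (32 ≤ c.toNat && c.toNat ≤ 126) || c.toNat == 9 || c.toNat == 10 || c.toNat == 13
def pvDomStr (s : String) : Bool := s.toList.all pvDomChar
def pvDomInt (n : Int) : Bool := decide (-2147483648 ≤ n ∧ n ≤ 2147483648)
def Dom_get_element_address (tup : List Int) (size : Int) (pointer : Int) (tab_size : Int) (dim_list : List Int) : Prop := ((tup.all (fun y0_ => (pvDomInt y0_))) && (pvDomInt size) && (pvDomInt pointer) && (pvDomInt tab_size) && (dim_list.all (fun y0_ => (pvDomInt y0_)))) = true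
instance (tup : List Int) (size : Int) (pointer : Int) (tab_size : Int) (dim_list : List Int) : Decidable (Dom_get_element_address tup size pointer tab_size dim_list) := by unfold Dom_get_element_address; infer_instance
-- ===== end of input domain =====

-- B replaces A's quadratic recomputation of each suffix product by one backward pass with a
-- running stride product (objective: faster, asymptotically).

-- ===== PORT A =====
def get_element_address (tup : List Int) (size : Int) (pointer : Int) (tab_size : Int) (dim_list : List Int) : Int :=
  let dim_nb : Int := dim_list.length
  let pos : Int := pointer - tab_size
  let pos := (PySem.List.pyRange 0 (dim_nb - 1) 1).foldl
    (fun pos i =>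
      let subtab_size := (PySem.List.pyRange (i + 1) dim_nb 1).foldl
        (fun s j => s * PySem.List.pyGetD dim_list j 0) size
      pos + PySem.List.pyGetD tup i 0 * subtab_size) pos
  pos + size * PySem.List.pyGetD tup (dim_nb - 1) 0

-- ===== PORT B =====
def get_element_address_alt (tup : List Int) (size : Int) (pointer : Int) (tab_size : Int) (dim_list : List Int) : Int :=
  let st := (PySem.List.pyRange ((dim_list.length : Int) - 1) (-1) (-1)).foldl
    (fun (st : Int × Int) i =>
      (st.1 + PySem.List.pyGetD tup i 0 * st.2, st.2 * PySem.List.pyGetD dim_list i 0))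
    (pointer - tab_size, size)
  st.1

-- ===== PRECONDITION & SPEC =====
-- Pre_ excludes exactly the inputs where Python A raises IndexError: tup shorter than dim_list,
-- or both lists empty (then A reads tup[-1] of an empty list).
def Pre_get_element_address (tup : List Int) (size : Int) (pointer : Int) (tab_size : Int) (dim_list : List Int) : Prop :=
  dim_list.length ≤ tup.length ∧ tup ≠ []
instance (tup : List Int) (size : Int) (pointer : Int) (tab_size : Int) (dim_list : List Int) : Decidable (Pre_get_element_address tup size pointer tab_size dim_list) := by unfold Pre_get_element_address; infer_instance

def pvWitness_get_element_address : List Int × Int × Int × Int × List Int := ([0], 1, 0, 0, [1])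

-- When dim_list is empty (and tup is not), A returns pointer - tab_size + size*tup[-1] via
-- negative-index wraparound, while B returns pointer - tab_size; with no dimensions there is no
-- element offset, so B's value is the intended one.
def D_get_element_address (tup : List Int) (size : Int) (pointer : Int) (tab_size : Int) (dim_list : List Int) : Prop :=
  dim_list = [] ∧ size * (tup.getLast?.getD 0) ≠ 0
instance (tup : List Int) (size : Int) (pointer : Int) (tab_size : Int) (dim_list : List Int) : Decidable (D_get_element_address tup size pointer tab_size dim_list) := by unfold D_get_element_address; infer_instance

def Spec_get_element_address (tup : List Int) (size : Int) (pointer : Int) (tab_size : Int) (dim_list : List Int) (out : Int) : Prop := ¬ D_get_element_address tup size pointer tab_size dim_list → out = get_element_address_alt tup size pointer tab_size dim_list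
instance (tup : List Int) (size : Int) (pointer : Int) (tab_size : Int) (dim_list : List Int) (out : Int) : Decidable (Spec_get_element_address tup size pointer tab_size dim_list out) := by unfold Spec_get_element_address; infer_instance

def pvDiffWitness_get_element_address : List Int × Int × Int × Int × List Int := ([5], 2, 10, 0, [])
def pvDiffWitnessOut_get_element_address : Int × Int := (20, 10)

-- ===== CLAIM (what is proved, stated in full; the proofs are below) =====
def Claim_unchanged_get_element_address : Prop := ∀ (tup : List Int) (size : Int) (pointer : Int) (tab_size : Int) (dim_list : List Int), Dom_get_element_address tup size pointer tab_size dim_list → Pre_get_element_address tup size pointer tab_size dim_list → Spec_get_element_address tup size pointer tab_size dim_list (get_element_address tup size pointer tab_size dim_list)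
def Claim_changed_get_element_address : Prop := Dom_get_element_address (pvDiffWitness_get_element_address.1) (pvDiffWitness_get_element_address.2.1) (pvDiffWitness_get_element_address.2.2.1) (pvDiffWitness_get_element_address.2.2.2.1) (pvDiffWitness_get_element_address.2.2.2.2) ∧ Pre_get_element_address (pvDiffWitness_get_element_address.1) (pvDiffWitness_get_element_address.2.1) (pvDiffWitness_get_element_address.2.2.1) (pvDiffWitness_get_element_address.2.2.2.1) (pvDiffWitness_get_element_address.2.2.2.2) ∧ D_get_element_address (pvDiffWitness_get_element_address.1) (pvDiffWitness_get_element_address.2.1) (pvDiffWitness_get_element_address.2.2.1) (pvDiffWitness_get_element_address.2.2.2.1) (pvDiffWitness_get_element_address.2.2.2.2) ∧ get_element_address (pvDiffWitness_get_element_address.1) (pvDiffWitness_get_element_address.2.1) (pvDiffWitness_get_element_address.2.2.1) (pvDiffWitness_get_element_address.2.2.2.1) (pvDiffWitness_get_element_address.2.2.2.2) = pvDiffWitnessOut_get_element_address.1 ∧ get_element_address_alt (pvDiffWitness_get_element_address.1) (pvDiffWitness_get_element_address.2.1) (pvDiffWitness_get_element_address.2.2.1) (pvDiffWitness_get_element_address.2.2.2.1)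 (pvDiffWitness_get_element_address.2.2.2.2) = pvDiffWitnessOut_get_element_address.2 ∧ pvDiffWitnessOut_get_element_address.1 ≠ pvDiffWitnessOut_get_element_address.2
def Claim_exact_get_element_address : Prop := ∀ (tup : List Int) (size : Int) (pointer : Int) (tab_size : Int) (dim_list : List Int), Dom_get_element_address tup size pointer tab_size dim_list → Pre_get_element_address tup size pointer tab_size dim_list → D_get_element_address tup size pointer tab_size dim_list → get_element_address tup size pointer tab_size dim_list ≠ get_element_address_alt tup size pointer tab_size dim_list

-- ===== LEMMAS AND PROOFS =====

-- the common closed form: sum over the first k indices of tup[i] * (size * prod of dim_list[i+1:])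
def pvT (tup dim_list : List Int) (size : Int) (k : Nat) : Int :=
  ((List.range k).map (fun (i : Nat) => PySem.List.pyGetD tup (i : Int) 0 * (size * ((dim_list.drop (i + 1)).prod)))).sum

theorem pvT_succ (tup dim_list : List Int) (size : Int) (k : Nat) :
    pvT tup dim_list size (k + 1)
      = pvT tup dim_list size k + PySem.List.pyGetD tup (k : Int) 0 * (size * ((dim_list.drop (k + 1)).prod)) := by
  simp [pvT, List.range_succ]

theorem pv_foldl_mul (l : List Int) (a : Int) : l.foldl (· * ·) a = a * l.prod := by
  induction l generalizing a with
  | nil => simp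
  | cons x xs ih => simp [List.foldl_cons, ih, mul_assoc]

-- B's backward loop computes the closed form with a running stride product
theorem pvB_loop (tup dim_list : List Int) (size : Int) (k : Nat) (hk : k ≤ dim_list.length) :
    ∀ pos : Int,
      (PySem.List.pyRange ((k : Int) - 1) (-1) (-1)).foldl
        (fun (st : Int × Int) i =>
          (st.1 + PySem.List.pyGetD tup i 0 * st.2, st.2 * PySem.List.pyGetD dim_list i 0))
        (pos, size * ((dim_list.drop k).prod))
      = (pos + pvT tup dim_list size k, size * dim_list.prod) := by
  induction k with
  | zero =>
    intro pos
    rw [PySem.List.pyRange_neg_one_eq_nil (by omega)]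
    simp [pvT]
  | succ k ih =>
    intro pos
    rw [show ((k + 1 : Nat) : Int) - 1 = (k : Int) from by push_cast; ring]
    rw [PySem.List.pyRange_neg_one_cons (by omega)]
    have hklt : k < dim_list.length := by omega
    have hdk : PySem.List.pyGetD dim_list (k : Int) 0 = dim_list[k] :=
      PySem.List.pyGetD_ofNat dim_list k 0 hklt
    have hdrop : dim_list.drop k = dim_list[k] :: dim_list.drop (k + 1) :=
      List.drop_eq_getElem_cons hklt
    have hmul : size * (dim_list.drop (k + 1)).prod * PySem.List.pyGetD dim_list (k : Int) 0
        = size * (dim_list.drop k).prod := by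
      rw [hdk, hdrop, List.prod_cons]; ring
    rw [List.foldl_cons]
    simp only [hmul]
    rw [ih (by omega)]
    rw [pvT_succ]
    simp only [Prod.mk.injEq]
    exact ⟨by ring, trivial⟩

theorem pvB_eq (tup : List Int) (size pointer tab_size : Int) (dim_list : List Int) :
    get_element_address_alt tup size pointer tab_size dim_list
      = (pointer - tab_size) + pvT tup dim_list size dim_list.length := by
  unfold get_element_address_alt
  have h := pvB_loop tup dim_list size dim_list.length (le_refl _) (pointer - tab_size)
  simp only [List.drop_length, List.prod_nil, mul_one] at h
  simp only [h]

-- A's outer loop up to any bound m computes the closed form, each suffix product recomputed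
theorem pvA_loop (tup dim_list : List Int) (size : Int) (m : Nat) :
    ∀ pos : Int,
      (PySem.List.pyRange 0 (m : Int) 1).foldl
        (fun pos i =>
          pos + PySem.List.pyGetD tup i 0 *
            ((PySem.List.pyRange (i + 1) ((dim_list.length : Int)) 1).foldl
              (fun s j => s * PySem.List.pyGetD dim_list j 0) size)) pos
      = pos + pvT tup dim_list size m := by
  induction m with
  | zero =>
    intro pos
    rw [PySem.List.pyRange_one_eq_nil (by omega)]
    simp [pvT]
  | succ m ih =>
    intro pos
    rw [show ((m + 1 : Nat) : Int) = (m : Int) + 1 from by push_cast; ring,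
        PySem.List.pyRange_one_succ_right (by omega), List.foldl_append]
    rw [ih pos]
    simp only [List.foldl_cons, List.foldl_nil]
    have hin : (PySem.List.pyRange ((m : Int) + 1) ((dim_list.length : Int)) 1).foldl
        (fun s j => s * PySem.List.pyGetD dim_list j 0) size
        = size * ((dim_list.drop (m + 1)).prod) := by
      have := PySem.List.foldl_pyRange_pyGetD' dim_list (0 : Int)
        (fun s (x : Int) => s * x) size (a := (m : Int) + 1) (by omega)
      rw [show (((m : Int) + 1).toNat) = m + 1 by omega] at this
      rw [this, pv_foldl_mul]
    rw [hin, pvT_succ]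
    ring

theorem pvA_eq (tup : List Int) (size pointer tab_size : Int) (dim_list : List Int)
    (h : dim_list ≠ []) :
    get_element_address tup size pointer tab_size dim_list
      = (pointer - tab_size) + pvT tup dim_list size dim_list.length := by
  unfold get_element_address
  dsimp only
  have hn : 1 ≤ dim_list.length := List.length_pos_of_ne_nil h
  rw [show ((dim_list.length : Int) - 1) = ((dim_list.length - 1 : Nat) : Int) by omega]
  rw [pvA_loop tup dim_list size (dim_list.length - 1) (pointer - tab_size)]
  rw [show dim_list.length = (dim_list.length - 1) + 1 by omega, pvT_succ]
  rw [show (dim_list.length - 1) + 1 = dim_list.length by omega]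
  simp only [List.drop_length, List.prod_nil, mul_one]
  ring

theorem pv_empty_A (tup : List Int) (size pointer tab_size : Int) (h : tup ≠ []) :
    get_element_address tup size pointer tab_size []
      = (pointer - tab_size) + size * tup.getLast h := by
  unfold get_element_address
  dsimp only [List.length_nil]
  rw [show (((0 : Nat) : Int) - 1) = (-1 : Int) from by norm_num]
  rw [PySem.List.pyRange_one_eq_nil (by omega)]
  simp [PySem.List.pyGetD_neg_one tup 0 h]

theorem pv_empty_B (tup : List Int) (size pointer tab_size : Int) :
    get_element_address_alt tup size pointer tab_size [] = pointer - tab_size := by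
  unfold get_element_address_alt
  dsimp only [List.length_nil]
  rw [show (((0 : Nat) : Int) - 1) = (-1 : Int) from by norm_num]
  rw [PySem.List.pyRange_neg_one_eq_nil (by omega)]
  simp

theorem pv_getLast_getD (tup : List Int) (h : tup ≠ []) :
    tup.getLast?.getD 0 = tup.getLast h := by
  rw [List.getLast?_eq_some_getLast h]; rfl

-- ===== VERDICT (by name: the statement is the Claim_ definition above) =====
theorem get_element_address_spec : Claim_unchanged_get_element_address := by
  unfold Claim_unchanged_get_element_address
  intro tup size pointer tab_size dim_list _ hpre hnd
  by_cases hdim : dim_list = []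
  · subst hdim
    have htup : tup ≠ [] := hpre.2
    have hz : size * (tup.getLast?.getD 0) = 0 := by
      by_contra hc
      exact hnd ⟨rfl, hc⟩
    rw [pv_getLast_getD tup htup] at hz
    rw [pv_empty_A tup size pointer tab_size htup, pv_empty_B, hz, add_zero]
  · rw [pvA_eq tup size pointer tab_size dim_list hdim, pvB_eq]

theorem get_element_address_changed : Claim_changed_get_element_address := by
  unfold Claim_changed_get_element_address; decide

theorem get_element_address_tight : Claim_exact_get_element_address := by
  unfold Claim_exact_get_element_address
  intro tup size pointer tab_size dim_list _ hpre hd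
  obtain ⟨hdim, hne⟩ := hd
  subst hdim
  have htup : tup ≠ [] := hpre.2
  rw [pv_getLast_getD tup htup] at hne
  rw [pv_empty_A tup size pointer tab_size htup, pv_empty_B]
  intro hc
  omega
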